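-- pv_equiv track=rewrite | github.com/kwakwoohyun/Algorithm-Python | programers/Lv1_1_Lotto.py | solution
-- ===== SOURCE A (Python) =====
-- def solution(lottos, win_nums):
--     answer = []
--     zero_count = lottos.count(0)
--     count = 0
--     for i in win_nums:
--         if i in lottos:
--             count += 1
--     answer.append(getRank(count + zero_count))
--     answer.append(getRank(count))
--     return answer
--
-- def getRank(num):
--     rank = 0
--     if num == 1 or num == 0:
--         rank = 6
--     elif num == 2:
--         rank = 5
--     elif num == 3:
--         rank = 4
--     elif num == 4:
--         rank = 3
--     elif num == 5:
--         rank = 2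
--     elif num == 6:
--         rank = 1
--     return rank
-- ===== SOURCE B (Python) =====
-- def solution(lottos, win_nums):
--     ls = sorted(lottos)
--     ws = sorted(win_nums)
--     matched = 0
--     i = 0
--     j = 0
--     while i < len(ws) and j < len(ls):
--         if ws[i] < ls[j]:
--             i += 1
--         elif ws[i] > ls[j]:
--             j += 1
--         else:
--             matched += 1
--             i += 1
--     zeros = 0
--     for x in ls:
--         if x > 0:
--             break
--         if x == 0:
--             zeros += 1
--     def rank(n):
--         return 0 if n > 6 else 7 - max(n, 1)
--     return [rank(matched + zeros), rank(matched)]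
-- ===== Notes on version B (the rewrite author's own statement) =====
-- stated objective: alternative
-- what changed: B sorts both lists and counts matches with a two-pointer merge (and counts zeros by scanning the sorted prefix with early exit), then maps counts through the closed form rank(n) = 0 if n > 6 else 7 - max(n,1), instead of A's per-winning-number list scans and the 7-branch if-elif ladder.
import Mathlib
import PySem

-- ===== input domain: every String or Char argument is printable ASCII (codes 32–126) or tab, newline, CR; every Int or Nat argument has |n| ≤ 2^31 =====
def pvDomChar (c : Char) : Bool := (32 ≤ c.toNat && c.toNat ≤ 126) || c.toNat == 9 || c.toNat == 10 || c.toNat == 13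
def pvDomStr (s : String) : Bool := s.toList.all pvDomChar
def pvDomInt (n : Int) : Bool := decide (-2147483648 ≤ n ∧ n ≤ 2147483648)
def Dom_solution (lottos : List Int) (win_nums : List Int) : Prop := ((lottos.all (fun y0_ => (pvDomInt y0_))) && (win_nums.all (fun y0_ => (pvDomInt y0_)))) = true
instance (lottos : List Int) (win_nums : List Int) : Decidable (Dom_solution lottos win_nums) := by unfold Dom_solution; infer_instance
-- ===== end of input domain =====

-- B sorts both lists and counts matches with a two-pointer merge (and zeros by an early-exit
-- scan of the sorted list), mapping counts through the closed form rank(n); objective: alternative.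

-- ===== PORT A =====
def getRank (num : Int) : Int :=
  let rank : Int := 0
  if num == 1 || num == 0 then 6
  else if num == 2 then 5
  else if num == 3 then 4
  else if num == 4 then 3
  else if num == 5 then 2
  else if num == 6 then 1
  else rank

def solution (lottos : List Int) (win_nums : List Int) : List Int :=
  let zero_count : Int := (PySem.List.count lottos 0 : Int)
  let count : Int := win_nums.foldl (fun acc i => if lottos.contains i then acc + 1 else acc) 0
  [getRank (count + zero_count), getRank count]

-- ===== PORT B =====
-- two-pointer merge over the two sorted lists (B's while loop)
def mergeCount : List Int → List Int → Int
  | [], _ => 0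
  | _ :: _, [] => 0
  | w :: ws, l :: ls =>
    if w < l then mergeCount ws (l :: ls)
    else if w > l then mergeCount (w :: ws) ls
    else 1 + mergeCount ws (l :: ls)
termination_by ws ls => ws.length + ls.length

-- B's early-exit zero scan over the sorted list
def countZeros : List Int → Int
  | [] => 0
  | x :: xs => if x > 0 then 0 else if x == 0 then 1 + countZeros xs else countZeros xs

def rankB (n : Int) : Int := if n > 6 then 0 else 7 - max n 1

def solution_alt (lottos : List Int) (win_nums : List Int) : List Int :=
  let ls := PySem.List.sorted lottos (fun x => x) false
  let ws := PySem.List.sorted win_nums (fun x => x) false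
  let matched : Int := mergeCount ws ls
  let zeros : Int := countZeros ls
  [rankB (matched + zeros), rankB matched]

-- ===== PRECONDITION & SPEC =====
def Spec_solution (lottos : List Int) (win_nums : List Int) (out : List Int) : Prop := out = solution_alt lottos win_nums
instance (lottos : List Int) (win_nums : List Int) (out : List Int) : Decidable (Spec_solution lottos win_nums out) := by unfold Spec_solution; infer_instance

-- ===== CLAIM =====
def Claim_equal_solution : Prop := ∀ (lottos : List Int) (win_nums : List Int), Dom_solution lottos win_nums → Spec_solution lottos win_nums (solution lottos win_nums)

-- ===== LEMMAS AND PROOFS =====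

theorem getRank_eq_rankB (n : Int) (h : 0 ≤ n) : getRank n = rankB n := by
  unfold getRank rankB
  split_ifs <;> simp_all <;> omega

-- merge count on sorted lists = number of elements of ws that occur in ls
theorem mergeCount_eq (ws ls : List Int) (hw : ws.Pairwise (· ≤ ·)) (hl : ls.Pairwise (· ≤ ·)) :
    mergeCount ws ls = ((ws.countP (fun w => ls.contains w)) : Int) := by
  induction ws, ls using mergeCount.induct with
  | case1 ls => simp [mergeCount]
  | case2 w ws =>
    have h0 : (w :: ws).countP (fun w => ([] : List Int).contains w) = 0 := by
      simp [List.countP_eq_zero]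
    simp [mergeCount, h0]
  | case3 w ws l ls hlt ih =>
    have hw' := (List.pairwise_cons.mp hw).2
    have hnm : ¬(w = l ∨ w ∈ ls) := by
      push Not
      refine ⟨by omega, fun hc => ?_⟩
      have := (List.pairwise_cons.mp hl).1 w hc
      omega
    rw [mergeCount, if_pos hlt, ih hw' hl]
    simp [List.countP_cons, hnm]
  | case4 w ws l ls hlt hgt ih =>
    have hl' := (List.pairwise_cons.mp hl).2
    rw [mergeCount, if_neg hlt, if_pos hgt, ih hw hl']
    congr 1
    apply List.countP_congr
    intro x hx
    have hwx : w ≤ x := by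
      rcases List.mem_cons.mp hx with h | h
      · omega
      · exact (List.pairwise_cons.mp hw).1 x h
    have hxl : x ≠ l := by omega
    simp [List.contains_eq_mem, hxl]
  | case5 w ws l ls hlt hgt ih =>
    have heq : w = l := by omega
    have hw' := (List.pairwise_cons.mp hw).2
    rw [mergeCount, if_neg hlt, if_neg hgt, ih hw' hl]
    rw [List.countP_cons]
    simp [heq]
    push_cast
    omega

-- early-exit zero scan on a sorted list counts all zeros
theorem countZeros_eq (ls : List Int) (hl : ls.Pairwise (· ≤ ·)) :
    countZeros ls = ((ls.countP (fun x => x == 0)) : Int) := by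
  induction ls with
  | nil => simp [countZeros]
  | cons x xs ih =>
    have hx := (List.pairwise_cons.mp hl).1
    have hxs := (List.pairwise_cons.mp hl).2
    by_cases hpos : x > 0
    · have h0 : xs.countP (fun x => x == 0) = 0 := by
        rw [List.countP_eq_zero]
        intro y hy
        have := hx y hy
        simp; omega
      simp [countZeros, hpos, List.countP_cons, h0]
      omega
    · by_cases hz : x = 0
      · simp [countZeros, hpos, hz, List.countP_cons, ih hxs]
        push_cast; ring
      · have hne : (x == 0) = false := by simp [hz]
        simp [countZeros, hpos, hz, List.countP_cons, hne, ih hxs]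

theorem solution_spec : Claim_equal_solution := by
  intro lottos win_nums _
  unfold Spec_solution solution solution_alt
  simp only []
  have hls : (PySem.List.sorted lottos (fun x => x) false).Pairwise (· ≤ ·) :=
    PySem.List.sorted_pairwise (key := fun x => x) (xs := lottos)
  have hws : (PySem.List.sorted win_nums (fun x => x) false).Pairwise (· ≤ ·) :=
    PySem.List.sorted_pairwise (key := fun x => x) (xs := win_nums)
  have hpl : (PySem.List.sorted lottos (fun x => x) false).Perm lottos :=
    PySem.List.sorted_perm ..
  have hpw : (PySem.List.sorted win_nums (fun x => x) false).Perm win_nums :=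
    PySem.List.sorted_perm ..
  have hcount : win_nums.foldl (fun acc i => if lottos.contains i then acc + 1 else acc) (0 : Int)
      = mergeCount (PySem.List.sorted win_nums (fun x => x) false) (PySem.List.sorted lottos (fun x => x) false) := by
    rw [PySem.List.foldl_if_add_one, mergeCount_eq _ _ hws hls]
    rw [hpw.countP_eq]
    simp only [zero_add]
    congr 1
    apply List.countP_congr
    intro x _
    simp [List.contains_eq_mem, hpl.mem_iff]
  have hzero : (PySem.List.count lottos 0 : Int)
      = countZeros (PySem.List.sorted lottos (fun x => x) false) := by
    rw [countZeros_eq _ hls]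
    rw [hpl.countP_eq]
    simp [PySem.List.count, List.count_eq_countP]
  rw [hcount, hzero]
  have hm : (0:Int) ≤ mergeCount (PySem.List.sorted win_nums (fun x => x) false) (PySem.List.sorted lottos (fun x => x) false) := by
    rw [mergeCount_eq _ _ hws hls]; positivity
  have hz : (0:Int) ≤ countZeros (PySem.List.sorted lottos (fun x => x) false) := by
    rw [countZeros_eq _ hls]; positivity
  rw [getRank_eq_rankB _ (by omega), getRank_eq_rankB _ hm]
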